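-- pv_equiv track=rewrite | github.com/jacobposchl/bison-word-predictability | src/data/analysis_dataset.py | regenerate_pattern_from_sentence
-- ===== SOURCE A (Python) =====
-- def is_english_word(word: str) -> bool:
--     """
--     Check if word is primarily English characters.
--
--     Args:
--         word: Word to check
--
--     Returns:
--         True if word contains primarily ASCII characters
--     """
--     if not word:
--         return False
--     alpha_chars = [c for c in word if c.isalpha()]
--     if not alpha_chars:
--         return False
--     return all(ord(c) < 128 for c in alpha_chars)
--
-- def regenerate_pattern_from_sentence(sentence: str) -> str:
--     """
--     Regenerate pattern from actual sentence by detecting language of each word.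
--
--     This ensures the pattern matches the actual sentence structure (without fillers),
--     rather than using a pattern from a different version of the sentence.
--
--     Args:
--         sentence: Space-separated sentence
--
--     Returns:
--         Pattern string like "C5-E2-C3" representing language segments
--     """
--     if not sentence or not sentence.strip():
--         return ""
--
--     words = sentence.split()
--     if not words:
--         return ""
--
--     segments = []
--     current_lang = None
--     current_count = 0
--
--     for word in words:
--         # Determine language of current word
--         is_english = is_english_word(word)
--         word_lang = 'E' if is_english else 'C'
--
--         if word_lang == current_lang:
--             # Continue current segment
--             current_count += 1
--         else:
--             # Start new segment
--             if current_lang is not None: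
--                 segments.append(f"{current_lang}{current_count}")
--             current_lang = word_lang
--             current_count = 1
--
--     # Add final segment
--     if current_lang is not None:
--         segments.append(f"{current_lang}{current_count}")
--
--     return '-'.join(segments) if segments else ""
-- ===== SOURCE B (Python) =====
-- def is_english_word(word: str) -> bool:
--     alpha = [c for c in word if c.isalpha()]
--     return bool(alpha) and all(ord(c) < 128 for c in alpha)
--
-- def _merge_runs(left, right):
--     # Concatenate two run lists, fusing the seam if the adjacent runs share a label.
--     if not left:
--         return right
--     if not right:
--         return left
--     if left[-1][0] == right[0][0]:
--         return left[:-1] + [(left[-1][0], left[-1][1] + right[0][1])] + right[1:]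
--     return left + right
--
-- def _rle(labels):
--     # Divide-and-conquer run-length encoding of a label list.
--     if not labels:
--         return []
--     if len(labels) == 1:
--         return [(labels[0], 1)]
--     mid = len(labels) // 2
--     return _merge_runs(_rle(labels[:mid]), _rle(labels[mid:]))
--
-- def regenerate_pattern_from_sentence(sentence: str) -> str:
--     labels = ['E' if is_english_word(w) else 'C' for w in sentence.split()]
--     return '-'.join(f"{c}{n}" for c, n in _rle(labels))
-- ===== Notes on version B (the rewrite author's own statement) =====
-- stated objective: alternative
-- what changed: A's streaming one-pass accumulator FSM is replaced by a divide-and-conquer algorithm: label every word, then recursively split the label list in half, run-length-encode each half independently, and merge the two run lists, fusing the runs at the seam when they carry the same label.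
import Mathlib
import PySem

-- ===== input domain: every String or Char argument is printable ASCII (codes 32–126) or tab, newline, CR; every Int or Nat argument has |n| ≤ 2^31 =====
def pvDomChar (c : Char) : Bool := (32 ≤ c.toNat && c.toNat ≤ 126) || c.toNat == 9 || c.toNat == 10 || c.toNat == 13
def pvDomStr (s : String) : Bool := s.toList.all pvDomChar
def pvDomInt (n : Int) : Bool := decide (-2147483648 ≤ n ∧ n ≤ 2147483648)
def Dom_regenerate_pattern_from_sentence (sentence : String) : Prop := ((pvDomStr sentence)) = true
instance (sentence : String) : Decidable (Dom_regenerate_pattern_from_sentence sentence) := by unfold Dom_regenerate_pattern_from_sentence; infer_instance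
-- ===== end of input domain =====

-- B replaces A's single-pass language/count accumulator FSM by a divide-and-conquer
-- decomposition (label every word, then recursively split the label list, RLE each half
-- and merge the runs at the seam); alternative algorithm, no speed claim.


-- ===== PORT A =====
def is_english_word (word : List Char) : Bool :=
  if word.isEmpty then false
  else
    let alpha := word.filter PySem.Chars.isalpha
    if alpha.isEmpty then false
    else alpha.all (fun c => c.toNat < 128)

-- f"{lang}{count}"
def pvSeg (c : Char) (n : Nat) : List Char := c :: (PySem.Int.toStr (n : Int)).toList

-- the loop body of A (word_lang already computed)
def pvStepA (st : List (List Char) × Option Char × Nat) (word_lang : Char) :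
    List (List Char) × Option Char × Nat :=
  match st with
  | (segments, current_lang, current_count) =>
    if some word_lang = current_lang then (segments, current_lang, current_count + 1)
    else
      match current_lang with
      | some c => (segments ++ [pvSeg c current_count], some word_lang, 1)
      | none => (segments, some word_lang, 1)

-- "add final segment"
def pvFinalA (st : List (List Char) × Option Char × Nat) : List (List Char) :=
  match st.2.1 with
  | some c => st.1 ++ [pvSeg c st.2.2]
  | none => st.1

def regenerate_pattern_from_sentence (sentence : String) : String :=
  if sentence.toList.isEmpty || (PySem.Chars.strip sentence.toList).isEmpty then ""
  else
    let words := PySem.Chars.split₀ sentence.toList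
    if words.isEmpty then ""
    else
      let st := words.foldl
        (fun st word => pvStepA st (if is_english_word word then 'E' else 'C')) ([], none, 0)
      let segments := pvFinalA st
      if segments.isEmpty then "" else String.ofList (PySem.Chars.join ['-'] segments)

-- ===== PORT B =====
def is_english_word_alt (word : List Char) : Bool :=
  let alpha := word.filter PySem.Chars.isalpha
  !alpha.isEmpty && alpha.all (fun c => c.toNat < 128)

-- Source B's _merge_runs: concatenate two run lists, fusing the seam on equal labels
-- (left[-1] = getLast?, left[:-1] = dropLast, right[0]/right[1:] = head/tail)
def pvMerge (l r : List (Char × Nat)) : List (Char × Nat) :=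
  match l.getLast?, r with
  | none, _ => r
  | some _, [] => l
  | some a, b :: rt =>
    if a.1 = b.1 then l.dropLast ++ [(a.1, a.2 + b.2)] ++ rt else l ++ r

-- Source B's _rle: divide-and-conquer run-length encoding
def pvRLE (l : List Char) : List (Char × Nat) :=
  match l with
  | [] => []
  | [c] => [(c, 1)]
  | a :: b :: t =>
    let mid := (a :: b :: t).length / 2
    pvMerge (pvRLE ((a :: b :: t).take mid)) (pvRLE ((a :: b :: t).drop mid))
termination_by l.length
decreasing_by
  · simp only [List.length_take, List.length_cons]; omega
  · simp only [List.length_drop, List.length_cons]; omega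

def regenerate_pattern_from_sentence_alt (sentence : String) : String :=
  let labels := (PySem.Chars.split₀ sentence.toList).map
    (fun w => if is_english_word_alt w then 'E' else 'C')
  String.ofList (PySem.Chars.join ['-']
    ((pvRLE labels).map (fun p => p.1 :: (PySem.Int.toStr (p.2 : Int)).toList)))

-- ===== PRECONDITION & SPEC =====
def Spec_regenerate_pattern_from_sentence (sentence : String) (out : String) : Prop := out = regenerate_pattern_from_sentence_alt sentence
instance (sentence : String) (out : String) : Decidable (Spec_regenerate_pattern_from_sentence sentence out) := by unfold Spec_regenerate_pattern_from_sentence; infer_instance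

-- ===== CLAIM (what is proved, stated in full; the proofs are below) =====
def Claim_equal_regenerate_pattern_from_sentence : Prop := ∀ (sentence : String), Dom_regenerate_pattern_from_sentence sentence → Spec_regenerate_pattern_from_sentence sentence (regenerate_pattern_from_sentence sentence)

-- ===== LEMMAS AND PROOFS =====

theorem isEng_eq (w : List Char) : is_english_word w = is_english_word_alt w := by
  cases w with
  | nil => simp [is_english_word, is_english_word_alt]
  | cons c cs =>
    simp only [is_english_word, is_english_word_alt, List.isEmpty_cons]
    by_cases h : ((c :: cs).filter PySem.Chars.isalpha).isEmpty <;> simp [h]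

-- prepend a run of n copies of c to a run list, merging with an equal head
def pvConsRun (c : Char) (n : Nat) : List (Char × Nat) → List (Char × Nat)
  | (d, m) :: rs => if d = c then (c, n + m) :: rs else (c, n) :: (d, m) :: rs
  | [] => [(c, n)]

-- canonical right-fold run-length encoding, the meeting point of both proofs
def pvRuns (l : List Char) : List (Char × Nat) := l.foldr (fun c rs => pvConsRun c 1 rs) []

theorem consRun_head (c : Char) (n : Nat) (rs : List (Char × Nat)) :
    ∃ m tl, pvConsRun c n rs = (c, m) :: tl := by
  cases rs with
  | nil => exact ⟨n, [], rfl⟩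
  | cons a tl =>
    obtain ⟨d, m⟩ := a
    by_cases h : d = c
    · exact ⟨n + m, tl, by simp [pvConsRun, h]⟩
    · exact ⟨n, (d, m) :: tl, by simp [pvConsRun, h]⟩

theorem consRun_ne_nil (c : Char) (n : Nat) (rs : List (Char × Nat)) :
    pvConsRun c n rs ≠ [] := by
  obtain ⟨m, tl, h⟩ := consRun_head c n rs; simp [h]

theorem consRun_consRun (c : Char) (n m : Nat) (rs : List (Char × Nat)) :
    pvConsRun c n (pvConsRun c m rs) = pvConsRun c (n + m) rs := by
  cases rs with
  | nil => simp [pvConsRun]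
  | cons hd tl =>
    obtain ⟨d, k⟩ := hd
    by_cases h : d = c <;> simp [pvConsRun, h] <;> omega

-- structural version of the seam merge
def pvMergeS : List (Char × Nat) → List (Char × Nat) → List (Char × Nat)
  | [], r => r
  | [(c, n)], r => pvConsRun c n r
  | a :: b :: t, r => a :: pvMergeS (b :: t) r

theorem mergeS_nil_right (l : List (Char × Nat)) : pvMergeS l [] = l := by
  induction l with
  | nil => rfl
  | cons a t ih =>
    cases t with
    | nil => obtain ⟨c, n⟩ := a; simp [pvMergeS, pvConsRun]
    | cons b t' => simpa [pvMergeS] using ih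

theorem pvMerge_eq (l r : List (Char × Nat)) : pvMerge l r = pvMergeS l r := by
  induction l with
  | nil => simp [pvMerge, pvMergeS]
  | cons a t ih =>
    cases t with
    | nil =>
      obtain ⟨c, n⟩ := a
      cases r with
      | nil => simp [pvMerge, pvMergeS, pvConsRun]
      | cons b rt =>
        obtain ⟨d, m⟩ := b
        by_cases h : c = d
        · subst h; simp [pvMerge, pvMergeS, pvConsRun]
        · simp [pvMerge, pvMergeS, pvConsRun, h, Ne.symm h]
    | cons b t' =>
      obtain ⟨g, hg⟩ : ∃ g, (b :: t').getLast? = some g := by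
        cases hgl : (b :: t').getLast? with
        | none => exact absurd hgl (by simp)
        | some g => exact ⟨g, rfl⟩
      have hL : (a :: b :: t').getLast? = some g := by
        rw [List.getLast?_cons_cons, hg]
      cases r with
      | nil => rw [mergeS_nil_right]; simp [pvMerge, hL]
      | cons x rt =>
        by_cases h : g.1 = x.1
        · have e1 : pvMerge (a :: b :: t') (x :: rt)
              = a :: ((b :: t').dropLast ++ [(g.1, g.2 + x.2)] ++ rt) := by
            simp [pvMerge, hL, h]
          have e2 : pvMerge (b :: t') (x :: rt)
              = (b :: t').dropLast ++ [(g.1, g.2 + x.2)] ++ rt := by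
            simp [pvMerge, hg, h]
          rw [e1]
          simp only [pvMergeS]
          rw [← ih, e2]
        · have e1 : pvMerge (a :: b :: t') (x :: rt) = (a :: b :: t') ++ (x :: rt) := by
            simp [pvMerge, hL, h]
          have e2 : pvMerge (b :: t') (x :: rt) = (b :: t') ++ (x :: rt) := by
            simp [pvMerge, hg, h]
          rw [e1]
          simp only [pvMergeS]
          rw [← ih, e2]
          simp

theorem mergeS_consRun (c : Char) (n : Nat) (L R : List (Char × Nat)) :
    pvMergeS (pvConsRun c n L) R = pvConsRun c n (pvMergeS L R) := by
  cases L with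
  | nil => simp [pvConsRun, pvMergeS]
  | cons a L' =>
    obtain ⟨d, m⟩ := a
    by_cases h : d = c
    · subst h
      cases L' with
      | nil =>
        have h1 : pvConsRun d n [(d, m)] = [(d, n + m)] := by simp [pvConsRun]
        rw [h1]
        simp [pvMergeS, consRun_consRun]
      | cons e L'' =>
        simp [pvConsRun, pvMergeS]
    · cases L' with
      | nil =>
        have h1 : pvConsRun c n [(d, m)] = [(c, n), (d, m)] := by simp [pvConsRun, h]
        have h2 : pvMergeS [(d, m)] R = pvConsRun d m R := by simp [pvMergeS]
        obtain ⟨k, tl, hk⟩ := consRun_head d m R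
        rw [h1]
        have h3 : pvMergeS [(c, n), (d, m)] R = (c, n) :: pvConsRun d m R := by
          simp [pvMergeS]
        rw [h3, h2, hk]
        simp [pvConsRun, h]
      | cons e L'' =>
        simp [pvConsRun, pvMergeS, h]

theorem runs_append (xs ys : List Char) :
    pvMergeS (pvRuns xs) (pvRuns ys) = pvRuns (xs ++ ys) := by
  induction xs with
  | nil => simp [pvRuns, pvMergeS]
  | cons c t ih =>
    have : pvRuns (c :: t) = pvConsRun c 1 (pvRuns t) := rfl
    rw [this, mergeS_consRun, ih]
    rfl

theorem pvRLE_eq (l : List Char) : pvRLE l = pvRuns l := by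
  induction hn : l.length using Nat.strong_induction_on generalizing l with
  | _ n ih =>
    cases l with
    | nil => simp [pvRLE, pvRuns]
    | cons a t0 =>
      cases t0 with
      | nil => simp [pvRLE, pvRuns, pvConsRun]
      | cons b t =>
        rw [pvRLE]
        simp only [List.length_cons] at hn
        rw [ih _ (by simp only [List.length_take, List.length_cons]; omega) _ rfl,
            ih _ (by simp only [List.length_drop, List.length_cons]; omega) _ rfl,
            pvMerge_eq, runs_append, List.take_append_drop]

theorem loopA (ls : List Char) : ∀ (segs : List (List Char)) (c : Char) (n : Nat),
    pvFinalA (ls.foldl pvStepA (segs, some c, n)) =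
      segs ++ (pvConsRun c n (pvRuns ls)).map (fun p => pvSeg p.1 p.2) := by
  induction ls with
  | nil => intro segs c n; simp [pvFinalA, pvRuns, pvConsRun]
  | cons d t ih =>
    intro segs c n
    by_cases h : d = c
    · subst h
      have hstep : pvStepA (segs, some d, n) d = (segs, some d, n + 1) := by
        simp [pvStepA]
      have hruns : pvRuns (d :: t) = pvConsRun d 1 (pvRuns t) := rfl
      rw [List.foldl_cons, hstep, ih, hruns, consRun_consRun]
    · have hstep : pvStepA (segs, some c, n) d = (segs ++ [pvSeg c n], some d, 1) := by
        simp [pvStepA, h]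
      have hruns : pvRuns (d :: t) = pvConsRun d 1 (pvRuns t) := rfl
      have hne : pvConsRun c n (pvRuns (d :: t)) = (c, n) :: pvRuns (d :: t) := by
        obtain ⟨m, tl, hm⟩ := consRun_head d 1 (pvRuns t)
        rw [hruns, hm]
        simp [pvConsRun, h]
      rw [List.foldl_cons, hstep, ih, hne, hruns]
      simp

theorem split₀_go_allspace (cs : List Char) : ∀ (acc : List (List Char)),
    (∀ c ∈ cs, PySem.Chars.isspace c = true) →
    PySem.Chars.split₀.go cs [] acc = acc.reverse := by
  induction cs with
  | nil => intro acc _; simp [PySem.Chars.split₀.go]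
  | cons c rest ih =>
    intro acc h
    have hc : PySem.Chars.isspace c = true := h c (by simp)
    simp [PySem.Chars.split₀.go, hc]
    exact ih acc (fun x hx => h x (by simp [hx]))

theorem split₀_of_strip_nil (cs : List Char) (h : PySem.Chars.strip cs = []) :
    PySem.Chars.split₀ cs = [] := by
  have hall : ∀ c ∈ cs, PySem.Chars.isspace c = true := by
    have h2 : ∀ c ∈ PySem.Chars.lstrip cs, PySem.Chars.isspace c = true := by
      have : List.dropWhile PySem.Chars.isspace (PySem.Chars.lstrip cs).reverse = [] := by
        have := h
        simp [PySem.Chars.strip, PySem.Chars.rstrip] at this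
        simpa using this
      intro x hx
      have := List.dropWhile_eq_nil_iff.mp this
      exact this x (List.mem_reverse.mpr hx)
    intro x hx
    rcases List.mem_append.mp
        (by rw [List.takeWhile_append_dropWhile] ; exact hx :
          x ∈ List.takeWhile PySem.Chars.isspace cs ++ List.dropWhile PySem.Chars.isspace cs) with
      h1 | h1
    · exact List.mem_takeWhile_imp h1
    · exact h2 x h1
  exact split₀_go_allspace cs [] hall

-- ===== VERDICT (by name: the statement is the Claim_ definition above) =====
theorem regenerate_pattern_from_sentence_spec : Claim_equal_regenerate_pattern_from_sentence := by
  intro sentence _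
  unfold Spec_regenerate_pattern_from_sentence
  unfold regenerate_pattern_from_sentence regenerate_pattern_from_sentence_alt
  by_cases hg : (sentence.toList.isEmpty || (PySem.Chars.strip sentence.toList).isEmpty) = true
  · have hsplit : PySem.Chars.split₀ sentence.toList = [] := by
      rw [Bool.or_eq_true] at hg
      rcases hg with h | h
      · have h' : sentence.toList = [] := by simpa using h
        rw [h']; rfl
      · exact split₀_of_strip_nil _ (by simpa using h)
    rw [if_pos hg, hsplit]
    simp [pvRLE, PySem.Chars.join, List.intercalate]
  · rw [if_neg hg]
    have hmap : (PySem.Chars.split₀ sentence.toList).map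
        (fun w => if is_english_word_alt w then 'E' else 'C')
        = (PySem.Chars.split₀ sentence.toList).map
        (fun w => if is_english_word w then 'E' else 'C') := by
      simp [isEng_eq]
    rw [hmap]
    cases hw : PySem.Chars.split₀ sentence.toList with
    | nil => simp [pvRLE, PySem.Chars.join, List.intercalate]
    | cons w ws =>
      simp only [List.isEmpty_cons, List.map_cons, List.foldl_cons, Bool.false_eq_true,
        if_false]
      have hstep : pvStepA ([], none, 0) (if is_english_word w then 'E' else 'C')
          = ([], some (if is_english_word w then 'E' else 'C'), 1) := by
        simp [pvStepA]
      have hfold : (ws.foldl (fun st word => pvStepA st (if is_english_word word then 'E' else 'C'))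
            ([], some (if is_english_word w then 'E' else 'C'), 1))
          = (ws.map (fun word => if is_english_word word then 'E' else 'C')).foldl pvStepA
            ([], some (if is_english_word w then 'E' else 'C'), 1) := by
        rw [List.foldl_map]
      have hruns : pvRLE ((if is_english_word w then 'E' else 'C')
            :: ws.map (fun word => if is_english_word word then 'E' else 'C'))
          = pvConsRun (if is_english_word w then 'E' else 'C') 1
              (pvRuns (ws.map (fun word => if is_english_word word then 'E' else 'C'))) := by
        rw [pvRLE_eq]; rfl
      rw [hstep, hfold, hruns,
        loopA (ws.map (fun word => if is_english_word word then 'E' else 'C')) []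
          (if is_english_word w then 'E' else 'C') 1]
      simp [pvSeg]
      intro hnil
      exact absurd hnil (consRun_ne_nil _ _ _)
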